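-- pv_equiv track=rewrite | github.com/jatman2002/UoB.Y4.Dissertation | src/Algorithms/input_parsing.py | get_wasted_slots
-- ===== SOURCE A (Python) =====
-- def get_wasted_slots(diary):
--     min_booking_length = 6
--     total_wasted_slots = 0
--     wasted_count = 0
--     for table in diary:
--         empty_slots = 0
--         for slot in table:
--             # if slot == 0:
--             #     wasted_slots += 1
--             # else:
--             #     total_wasted_slots += wasted_slots % min_booking_length
--             #     wasted_count += 1
--             #     wasted_slots = 0
--
--             if slot != 0:
--                 if empty_slots < min_booking_length and empty_slots > 0:
--                     wasted_count += 1
--                 empty_slots = 0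
--                 continue
--             empty_slots += 1
--
--     return wasted_count
-- ===== SOURCE B (Python) =====
-- def get_wasted_slots(diary):
--     def gaps(table):
--         # count leading zeros
--         k = 0
--         while k < len(table) and table[k] == 0:
--             k += 1
--         rest = table[k:]
--         if not rest:
--             return 0
--         # rest starts with a non-zero slot; skip the non-zero run
--         m = 0
--         while m < len(rest) and rest[m] != 0:
--             m += 1
--         return (1 if 1 <= k <= 5 else 0) + gaps(rest[m:])
--     total = 0
--     for table in diary:
--         total += gaps(table)
--     return total
-- ===== Notes on version B (the rewrite author's own statement) =====
-- stated objective: alternative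
-- what changed: Replaces A's per-slot transition state machine (empty_slots counter updated per slot) with recursion on runs: each call strips the leading zero-run, counts it iff its length is 1..5 and a non-zero slot follows, strips the non-zero run and recurses.
import Mathlib
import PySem

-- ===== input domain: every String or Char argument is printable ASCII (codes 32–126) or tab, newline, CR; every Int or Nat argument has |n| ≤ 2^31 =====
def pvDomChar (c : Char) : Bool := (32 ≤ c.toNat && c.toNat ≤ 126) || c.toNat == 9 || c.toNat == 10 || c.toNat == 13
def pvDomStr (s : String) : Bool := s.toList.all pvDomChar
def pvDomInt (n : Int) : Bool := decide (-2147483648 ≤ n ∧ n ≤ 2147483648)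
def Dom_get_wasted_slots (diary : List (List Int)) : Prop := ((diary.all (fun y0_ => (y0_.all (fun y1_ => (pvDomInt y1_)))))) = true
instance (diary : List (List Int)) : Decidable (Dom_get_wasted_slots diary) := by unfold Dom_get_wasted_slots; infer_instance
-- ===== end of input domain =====

-- B replaces A's per-slot transition state machine with recursion on runs (strip a
-- zero-run, count it iff short and followed by a non-zero slot, strip the non-zero
-- run, recurse): an alternative decomposition of the same O(n) scan.

-- ===== PORT A =====
-- the per-slot state machine of A's inner loop: state = (wasted_count, empty_slots)
def pvStepA (st : Int × Int) (slot : Int) : Int × Int :=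
  if slot ≠ 0 then
    (if st.2 < 6 ∧ st.2 > 0 then st.1 + 1 else st.1, 0)
  else
    (st.1, st.2 + 1)

def get_wasted_slots (diary : List (List Int)) : Int :=
  diary.foldl (fun wasted_count table => (table.foldl pvStepA (wasted_count, 0)).1) 0

-- ===== PORT B =====
-- one recursive call per zero-run: k leading zeros, then (if any) a non-zero run, recurse
def pvGaps (table : List Int) : Int :=
  let k : Int := ((table.takeWhile (fun s => s == 0)).length : Int)
  let rest := table.dropWhile (fun s => s == 0)
  if _h : rest = [] then 0
  else (if 1 ≤ k ∧ k ≤ 5 then (1 : Int) else 0) + pvGaps (rest.dropWhile (fun s => s != 0))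
termination_by table.length
decreasing_by
  rcases hr : table.dropWhile (fun s => s == 0) with _ | ⟨r, rs⟩
  · exact absurd hr _h
  · have h1 : (rs.dropWhile (fun s => s != 0)).length ≤ rs.length :=
      List.length_dropWhile_le _ _
    have h2 : (table.dropWhile (fun s => s == 0)).length ≤ table.length :=
      List.length_dropWhile_le _ _
    have : (r != 0) = true := by
      have := List.head_dropWhile_not (fun s => s == 0) (l := table) (by simp [hr])
      simpa [hr] using this
    simp only [List.dropWhile_cons, this, if_true]
    rw [hr] at h2
    simp only [List.length_cons] at h2
    omega

def get_wasted_slots_alt (diary : List (List Int)) : Int :=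
  diary.foldl (fun total table => total + pvGaps table) 0

-- ===== PRECONDITION & SPEC =====
def Spec_get_wasted_slots (diary : List (List Int)) (out : Int) : Prop := out = get_wasted_slots_alt diary
instance (diary : List (List Int)) (out : Int) : Decidable (Spec_get_wasted_slots diary out) := by unfold Spec_get_wasted_slots; infer_instance

-- ===== CLAIM (what is proved, stated in full; the proofs are below) =====
def Claim_equal_get_wasted_slots : Prop := ∀ (diary : List (List Int)), Dom_get_wasted_slots diary → Spec_get_wasted_slots diary (get_wasted_slots diary)

-- ===== LEMMAS AND PROOFS =====

-- folding the state machine over a block of zeros only increments empty_slots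
theorem pv_fold_zeros (z : List Int) (hz : ∀ x ∈ z, (x == 0) = true) (wc e : Int) :
    z.foldl pvStepA (wc, e) = (wc, e + (z.length : Int)) := by
  induction z generalizing e with
  | nil => simp
  | cons a t ih =>
    have ha : (a == 0) = true := hz a (List.mem_cons_self ..)
    have ha' : a = 0 := by simpa using ha
    have ht : ∀ x ∈ t, (x == 0) = true := fun x hx => hz x (List.mem_cons_of_mem _ hx)
    simp only [List.foldl_cons, pvStepA, ha', ne_eq, not_true_eq_false, ite_false,
      List.length_cons]
    rw [ih ht (e + 1)]
    refine Prod.ext rfl ?_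
    push_cast
    ring

-- folding the state machine over non-zeros from empty_slots = 0 is a no-op
theorem pv_fold_nonzeros (nz : List Int) (hnz : ∀ x ∈ nz, (x != 0) = true) (wc : Int) :
    nz.foldl pvStepA (wc, 0) = (wc, 0) := by
  induction nz with
  | nil => rfl
  | cons a t ih =>
    have ha : a ≠ 0 := by simpa using hnz a (List.mem_cons_self ..)
    have ht : ∀ x ∈ t, (x != 0) = true := fun x hx => hnz x (List.mem_cons_of_mem _ hx)
    simp only [List.foldl_cons, pvStepA, ha, ne_eq, not_false_eq_true, if_pos]
    have : ¬((0 : Int) < 6 ∧ (0 : Int) > 0) := by omega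
    rw [if_neg this]
    exact ih ht

-- per-table: A's inner fold computes the generalized accumulator plus B's gap count
theorem pv_table_eq : ∀ (n : ℕ) (t : List Int), t.length ≤ n → ∀ wc : Int,
    (t.foldl pvStepA (wc, 0)).1 = wc + pvGaps t := by
  intro n
  induction n with
  | zero =>
    intro t ht wc
    have : t = [] := List.eq_nil_of_length_eq_zero (Nat.le_zero.mp ht)
    subst this
    simp [pvGaps]
  | succ n ih =>
    intro t ht wc
    have hsplit : t.takeWhile (fun s => s == 0) ++ t.dropWhile (fun s => s == 0) = t :=
      List.takeWhile_append_dropWhile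
    have hz : ∀ x ∈ t.takeWhile (fun s => s == 0), (x == 0) = true :=
      fun x hx => List.mem_takeWhile_imp (p := fun s => s == 0) hx
    rcases hr : t.dropWhile (fun s => s == 0) with _ | ⟨r, rs⟩
    · -- table is all zeros: no gap counted
      have hzall : ∀ x ∈ t, (x == 0) = true := by
        intro x hx
        rw [← hsplit] at hx
        rcases List.mem_append.mp hx with h | h
        · exact hz x h
        · rw [hr] at h; simp at h
      rw [pv_fold_zeros t hzall wc 0]
      rw [pvGaps]
      simp [hr]
    · -- a non-zero slot r follows the leading zeros
      have hrne0 : r ≠ 0 := by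
        have := List.head_dropWhile_not (fun s => s == 0) (l := t) (by simp [hr])
        simpa [hr] using this
      -- split rs into its non-zero prefix and the remainder
      have hsplit2 : rs.takeWhile (fun s => s != 0) ++ rs.dropWhile (fun s => s != 0) = rs :=
        List.takeWhile_append_dropWhile
      have hnz : ∀ x ∈ rs.takeWhile (fun s => s != 0), (x != 0) = true :=
        fun x hx => List.mem_takeWhile_imp (p := fun s => s != 0) hx
      set z := t.takeWhile (fun s => s == 0) with hzdef
      set t2 := rs.dropWhile (fun s => s != 0) with ht2def
      -- length bound for the induction hypothesis
      have hlen : t2.length ≤ n := by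
        have h1 : t2.length ≤ rs.length := List.length_dropWhile_le _ _
        have h2 : z.length + (r :: rs).length = t.length := by
          rw [← hsplit, hr]; simp
        simp only [List.length_cons] at h2
        omega
      calc (t.foldl pvStepA (wc, 0)).1
          = ((z ++ (r :: rs)).foldl pvStepA (wc, 0)).1 := by rw [← hr, hsplit]
        _ = ((r :: rs).foldl pvStepA (wc, (z.length : Int))).1 := by
              rw [List.foldl_append, pv_fold_zeros z hz wc 0, zero_add]
        _ = (rs.foldl pvStepA
              ((if (z.length : Int) < 6 ∧ (z.length : Int) > 0 then wc + 1 else wc), 0)).1 := by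
              simp only [List.foldl_cons, pvStepA, hrne0, ne_eq, not_false_eq_true, if_pos]
        _ = wc + (if 1 ≤ (z.length : Int) ∧ (z.length : Int) ≤ 5 then (1 : Int) else 0)
              + pvGaps t2 := by
              set wc' : Int := if (z.length : Int) < 6 ∧ (z.length : Int) > 0 then wc + 1 else wc
                with hwc'
              have : rs.foldl pvStepA (wc', 0)
                  = ((rs.takeWhile (fun s => s != 0)) ++ t2).foldl pvStepA (wc', 0) := by
                rw [ht2def, hsplit2]
              rw [this, List.foldl_append,
                pv_fold_nonzeros (rs.takeWhile (fun s => s != 0)) hnz wc', ih t2 hlen wc']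
              have hcond : ((z.length : Int) < 6 ∧ (z.length : Int) > 0)
                  ↔ (1 ≤ (z.length : Int) ∧ (z.length : Int) ≤ 5) := by omega
              simp only [hwc', hcond]
              split <;> ring
        _ = wc + pvGaps t := by
              conv_rhs => rw [pvGaps]
              simp only [hr, ← hzdef, List.dropWhile_cons,
                (show (r != 0) = true by simpa using hrne0), if_true, ← ht2def]
              rw [dif_neg (by simp : (r :: rs) ≠ [])]
              ring

-- the outer fold over tables, with A's accumulator threaded through the state machine
theorem pv_diary_eq : ∀ (d : List (List Int)) (acc : Int),
    d.foldl (fun wc table => (table.foldl pvStepA (wc, 0)).1) acc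
      = d.foldl (fun total table => total + pvGaps table) acc := by
  intro d
  induction d with
  | nil => intro acc; rfl
  | cons t d' ih =>
    intro acc
    simp only [List.foldl_cons]
    rw [pv_table_eq t.length t le_rfl acc, ih]

-- ===== VERDICT (by name: the statement is the Claim_ definition above) =====
theorem get_wasted_slots_spec : Claim_equal_get_wasted_slots := by
  intro diary _
  unfold Spec_get_wasted_slots get_wasted_slots get_wasted_slots_alt
  exact pv_diary_eq diary 0
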